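-- pv_equiv track=rewrite | github.com/CristianUruena/funciones.py | funcioned Py/ejercicio_14.py | eliminar_claves
-- ===== SOURCE A (Python) =====
-- def eliminar_claves(diccionario, claves):
--
--     cantidad_inicial = len(diccionario)
--
-- #elimina las claves especificadas en la lista
--     for clave in claves:
--         if clave in diccionario:
--             del diccionario[clave]
--
-- #Verifica si se elimino una clave
--     cantidad_final = len(diccionario)
--     exito = cantidad_inicial != cantidad_final
--
--     return diccionario, exito
-- ===== SOURCE B (Python) =====
-- def eliminar_claves(diccionario, claves):
--     a_borrar = set(claves)
--     restantes = [(k, v) for k, v in diccionario.items() if k not in a_borrar]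
--     exito = len(restantes) != len(diccionario)
--     diccionario.clear()
--     diccionario.update(restantes)
--     return diccionario, exito
-- ===== Notes on version B (the rewrite author's own statement) =====
-- stated objective: alternative
-- what changed: A loops over claves deleting each present key and compares dict lengths before/after; B instead traverses the dict once, partitions its items into the survivors whose key is not in set(claves), derives success from the survivor count, then clears the dict and rebuilds it in place from the survivors.
import Mathlib
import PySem

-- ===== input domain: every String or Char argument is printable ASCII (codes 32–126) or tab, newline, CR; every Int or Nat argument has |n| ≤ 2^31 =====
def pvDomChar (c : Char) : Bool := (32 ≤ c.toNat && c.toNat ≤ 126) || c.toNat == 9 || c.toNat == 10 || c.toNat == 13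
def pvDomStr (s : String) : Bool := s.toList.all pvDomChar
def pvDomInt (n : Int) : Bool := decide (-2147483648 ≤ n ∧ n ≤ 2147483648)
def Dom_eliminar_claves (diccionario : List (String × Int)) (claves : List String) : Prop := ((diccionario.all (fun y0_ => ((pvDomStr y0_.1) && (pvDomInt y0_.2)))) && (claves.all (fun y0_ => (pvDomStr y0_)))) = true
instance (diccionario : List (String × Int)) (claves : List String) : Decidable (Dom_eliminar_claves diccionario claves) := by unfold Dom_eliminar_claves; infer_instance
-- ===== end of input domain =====

-- B traverses the dict once, partitions its items into the survivors (key not in set(claves)),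
-- derives success from the survivor count, then clears and rebuilds the dict in place from the
-- survivors (objective: alternative decomposition); both Pythons leave the argument dict mutated
-- to the same contents, and the equivalence proved here is about the return value.

-- ===== PORT A =====
def eliminar_claves (diccionario : List (String × Int)) (claves : List String) : (List (String × Int)) × Bool :=
  let d0 := PySem.Dict.mk diccionario
  let cantidad_inicial := d0.size
  let d := claves.foldl (fun d clave => if d.contains clave then d.erase clave else d) d0
  let cantidad_final := d.size
  (d.items, decide (cantidad_inicial ≠ cantidad_final))

-- ===== PORT B =====
def eliminar_claves_alt (diccionario : List (String × Int)) (claves : List String) : (List (String × Int)) × Bool :=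
  let d0 := PySem.Dict.mk diccionario
  let a_borrar := PySem.Set.ofList claves
  let restantes := d0.items.filter (fun p => !(PySem.Set.contains a_borrar p.1))
  let exito := decide (restantes.length ≠ d0.items.length)
  let d := PySem.Dict.update PySem.Dict.empty restantes
  (d.items, exito)

-- ===== PRECONDITION & SPEC =====
-- Pre_ only states that the association list encodes a Python dict (unique keys, insertion order);
-- it excludes no Python input, since every Python dict has distinct keys.
def Pre_eliminar_claves (diccionario : List (String × Int)) (claves : List String) : Prop :=
  (diccionario.map Prod.fst).Nodup
instance (diccionario : List (String × Int)) (claves : List String) : Decidable (Pre_eliminar_claves diccionario claves) := by unfold Pre_eliminar_claves; infer_instance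

def pvWitness_eliminar_claves : (List (String × Int)) × List String := ([("a", 1), ("b", 2)], ["b", "z"])

def Spec_eliminar_claves (diccionario : List (String × Int)) (claves : List String) (out : (List (String × Int)) × Bool) : Prop := out = eliminar_claves_alt diccionario claves
instance (diccionario : List (String × Int)) (claves : List String) (out : (List (String × Int)) × Bool) : Decidable (Spec_eliminar_claves diccionario claves out) := by unfold Spec_eliminar_claves; infer_instance

-- ===== CLAIM (what is proved, stated in full; the proofs are below) =====
def Claim_equal_eliminar_claves : Prop := ∀ (diccionario : List (String × Int)) (claves : List String), Dom_eliminar_claves diccionario claves → Pre_eliminar_claves diccionario claves → Spec_eliminar_claves diccionario claves (eliminar_claves diccionario claves)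

-- ===== LEMMAS AND PROOFS =====

-- One step of A's loop is an unconditional filter: erasing an absent key changes nothing.
theorem stepA_items (d : PySem.Dict String Int) (c : String) :
    (if d.contains c then d.erase c else d).items
      = d.items.filter (fun p => !(p.1 == c)) := by
  by_cases h : d.contains c = true
  · simp [h, PySem.Dict.erase]
  · rw [if_neg (by simp [h])]
    rw [eq_comm]
    apply List.filter_eq_self.mpr
    intro p hp
    have h' : ∀ x : Int, (c, x) ∉ d.items := by simpa [PySem.Dict.contains] using h
    have hpc : p.1 ≠ c := fun hpc => h' p.2 (by rw [← Prod.mk.eta (p := p), hpc] at hp; exact hp)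
    simp [hpc]

-- A's whole loop filters out every key occurring in the list.
theorem foldA_items (l : List String) (d : PySem.Dict String Int) :
    (l.foldl (fun d clave => if d.contains clave then d.erase clave else d) d).items
      = d.items.filter (fun p => decide (p.1 ∉ l)) := by
  induction l generalizing d with
  | nil => simp
  | cons c l ih =>
      rw [List.foldl_cons, ih]
      conv_lhs => rw [show (if d.contains c then d.erase c else d) = PySem.Dict.mk (d.items.filter (fun p => !(p.1 == c))) from by rw [← stepA_items]]
      show (PySem.Dict.mk (d.items.filter (fun p => !(p.1 == c)))).items.filter _ = _
      simp only [List.filter_filter]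
      apply List.filter_congr
      intro p _
      by_cases h : p.1 = c <;> simp [h]

-- Updating an empty dict with a list of pairs whose keys are distinct yields exactly that list.
theorem items_update_empty (l : List (String × Int)) (h : (l.map Prod.fst).Nodup) :
    (PySem.Dict.update (PySem.Dict.empty : PySem.Dict String Int) l).items = l := by
  have : ∀ (d : PySem.Dict String Int), (∀ p ∈ l, d.contains p.1 = false) →
      (PySem.Dict.update d l).items = d.items ++ l := by
    induction l with
    | nil => intro d _; simp [PySem.Dict.update]
    | cons p l ih =>
        intro d hd
        simp only [List.map_cons, List.nodup_cons] at h
        have hstep : (PySem.Dict.update d (p :: l)) = PySem.Dict.update (d.insert p.1 p.2) l := by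
          simp [PySem.Dict.update]
        rw [hstep, ih h.2 _ ?_, PySem.Dict.items_insert_of_not_contains]
        · simp
        · exact hd p (by simp)
        · intro q hq
          rw [PySem.Dict.contains_insert]
          have h1 : (q.1 == p.1) = false := by
            simp only [beq_eq_false_iff_ne, ne_eq]
            exact fun he => h.1 (by rw [← he]; exact List.mem_map_of_mem hq)
          rw [h1, hd q (by simp [hq])]
          rfl
  simpa using this PySem.Dict.empty (by simp)

-- B's survivor filter and A's not-in-claves filter agree pointwise.
theorem filters_agree (claves : List String) (p : String × Int) :
    (!(PySem.Set.contains (PySem.Set.ofList claves) p.1)) = decide (p.1 ∉ claves) := by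
  by_cases h : p.1 ∈ claves <;>
    simp [PySem.Set.contains, PySem.Set.mem_ofList, h]

-- ===== VERDICT (by name: the statement is the Claim_ definition above) =====
theorem eliminar_claves_spec : Claim_equal_eliminar_claves := by
  intro diccionario claves _ hpre
  unfold Spec_eliminar_claves eliminar_claves eliminar_claves_alt
  have hfilters : (PySem.Dict.mk diccionario).items.filter
        (fun p => !(PySem.Set.contains (PySem.Set.ofList claves) p.1))
      = (PySem.Dict.mk diccionario).items.filter (fun p => decide (p.1 ∉ claves)) :=
    List.filter_congr (fun p _ => filters_agree claves p)
  have hnodup : (((PySem.Dict.mk diccionario).items.filter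
        (fun p => decide (p.1 ∉ claves))).map Prod.fst).Nodup := by
    refine List.Nodup.sublist (List.Sublist.map Prod.fst ?_) hpre
    exact List.filter_sublist
  simp only [PySem.Dict.size, foldA_items, hfilters, items_update_empty _ hnodup]
  exact Prod.ext rfl (decide_eq_decide.mpr ne_comm)
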